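-- pv_equiv track=rewrite | github.com/GuanZihan/Discrete-Optimization | Assignment/coloring/solver.py | swap_color
-- ===== SOURCE A (Python) =====
-- def swap_color(new_solution, violations, vio_edge, tabu_list, k, edges):
--     cur = new_solution
--     min_vio_edge = []
--     ret = []
--     min_vio = 999
--     for i in vio_edge:
--         for j in range(k):
--             cur[i[0]] = j
--             violations, vio_edge = evaluate(cur, edges)
--             if violations < min_vio:
--                 min_vio = violations
--                 ret = cur
--                 min_vio_edge = vio_edge
--     return ret, min_vio, min_vio_edge
--
-- def evaluate(solution, edges):
--     violation = 0
--     vio_edge = []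
--     for edge in edges:
--         if solution[edge[0]] == solution[edge[1]]:
--             violation += 1
--             vio_edge.append(edge)
--     return violation, vio_edge
-- ===== SOURCE B (Python) =====
-- def swap_color(new_solution, violations, vio_edge, tabu_list, k, edges):
--     arr = new_solution
--     best, min_vio, best_edges = [], 999, []
--     prev = None
--     for v, j in ((i[0], j) for i in vio_edge for j in range(k)):
--         if v != prev:
--             prev = v
--             incident = [e for e in edges if e[0] == v or e[1] == v]
--             rest = sum(1 for a, b in edges
--                        if a != v and b != v and arr[a] == arr[b])
--         arr[v] = j
--         cnt = rest + sum(1 for a, b in incident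
--                          if (j if a == v else arr[a]) == (j if b == v else arr[b]))
--         if cnt < min_vio:
--             min_vio = cnt
--             best = arr
--             best_edges = [e for e in edges if arr[e[0]] == arr[e[1]]]
--     return best, min_vio, best_edges
-- ===== Notes on version B (the rewrite author's own statement) =====
-- stated objective: faster
-- what changed: Instead of re-running a full evaluate() over all edges for every candidate colour of every flagged vertex, B iterates one flat stream of (vertex, colour) candidates, splits the edges once per vertex run (cached via 'prev') into edges incident to that vertex plus a violation count of the rest, scores each colour over only the incident edges, and rebuilds the violated-edge list only on improvement; …
-- outside the precondition, e.g. on swap_color([1, 1], 0, [(-1, 0)], [], 1, [(0, 1)]): A returns ([1, 0], 0, []), B returns ([1, 0], 1, [])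
import Mathlib
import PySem

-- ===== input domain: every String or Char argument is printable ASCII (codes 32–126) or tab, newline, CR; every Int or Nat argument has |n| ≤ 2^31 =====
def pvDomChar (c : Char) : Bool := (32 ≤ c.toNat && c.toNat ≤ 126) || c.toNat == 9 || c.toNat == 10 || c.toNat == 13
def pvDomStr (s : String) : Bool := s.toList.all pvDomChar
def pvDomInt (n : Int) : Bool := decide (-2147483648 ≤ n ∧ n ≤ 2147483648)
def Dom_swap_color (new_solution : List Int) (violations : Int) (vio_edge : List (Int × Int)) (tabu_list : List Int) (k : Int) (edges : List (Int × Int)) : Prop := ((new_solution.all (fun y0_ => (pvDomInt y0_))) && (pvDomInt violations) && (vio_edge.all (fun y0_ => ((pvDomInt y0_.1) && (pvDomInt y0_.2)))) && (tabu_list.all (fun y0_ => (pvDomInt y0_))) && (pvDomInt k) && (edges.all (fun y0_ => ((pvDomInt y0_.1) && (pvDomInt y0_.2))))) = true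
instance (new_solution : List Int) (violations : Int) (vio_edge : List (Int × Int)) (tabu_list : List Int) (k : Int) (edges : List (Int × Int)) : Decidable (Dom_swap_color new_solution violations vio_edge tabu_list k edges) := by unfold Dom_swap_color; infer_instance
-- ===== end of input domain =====

-- B scores each candidate colour over only the edges incident to the recolored vertex,
-- splitting the edge list once per vertex run (objective: faster). Both Pythons perform
-- the same in-place writes to new_solution; the equivalence proved here is about the
-- return value.

-- ===== PORT A =====
-- Python helper 'evaluate(solution, edges)'; indexing by the total pyGetD: out-of-range
-- (IndexError) inputs are excluded by Pre_swap_color.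
def pvEvaluate (solution : List Int) (edges : List (Int × Int)) : Int × List (Int × Int) :=
  edges.foldl
    (fun st edge =>
      if PySem.List.pyGetD solution edge.1 0 = PySem.List.pyGetD solution edge.2 0 then
        (st.1 + 1, st.2 ++ [edge])
      else st)
    (0, [])

-- body of A's inner 'for j in range(k)' loop; state = (cur, min_vio, min_vio_edge, found)
-- Python's 'ret = cur' aliases the list that keeps being mutated, so at return time ret is
-- the FINAL cur whenever any improvement happened: modeled by the Bool 'found' flag.
def pvInnerA (i : Int × Int) (edges : List (Int × Int))
    (st : List Int × Int × List (Int × Int) × Bool) (j : Int) :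
    List Int × Int × List (Int × Int) × Bool :=
  let cur := PySem.List.pySetD st.1 i.1 j
  let ev := pvEvaluate cur edges
  if ev.1 < st.2.1 then (cur, ev.1, ev.2, true)
  else (cur, st.2.1, st.2.2.1, st.2.2.2)

def swap_color (new_solution : List Int) (violations : Int) (vio_edge : List (Int × Int)) (tabu_list : List Int) (k : Int) (edges : List (Int × Int)) : List Int × Int × (List (Int × Int)) :=
  let st := vio_edge.foldl
    (fun st i => (PySem.List.pyRange 0 k 1).foldl (pvInnerA i edges) st)
    (new_solution, 999, ([] : List (Int × Int)), false)
  (if st.2.2.2 then st.1 else [], st.2.1, st.2.2.1)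

-- ===== PORT B =====
-- '[e for e in edges if e[0] == v or e[1] == v]'
def pvIncident (v : Int) (edges : List (Int × Int)) : List (Int × Int) :=
  edges.filter (fun e => decide (e.1 = v ∨ e.2 = v))

-- 'sum(1 for a, b in edges if a != v and b != v and arr[a] == arr[b])'
def pvRest (arr : List Int) (v : Int) (edges : List (Int × Int)) : Int :=
  (edges.countP (fun ab =>
    !(decide (ab.1 = v)) && !(decide (ab.2 = v)) &&
      decide (PySem.List.pyGetD arr ab.1 0 = PySem.List.pyGetD arr ab.2 0)) : Int)

-- '(j if a == v else arr[a]) == (j if b == v else arr[b])'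
def pvPred (arr : List Int) (v j : Int) (ab : Int × Int) : Bool :=
  decide ((if ab.1 = v then j else PySem.List.pyGetD arr ab.1 0)
        = (if ab.2 = v then j else PySem.List.pyGetD arr ab.2 0))

-- '[e for e in edges if arr[e[0]] == arr[e[1]]]'
def pvBestEdges (arr : List Int) (edges : List (Int × Int)) : List (Int × Int) :=
  edges.filter (fun e => decide (PySem.List.pyGetD arr e.1 0 = PySem.List.pyGetD arr e.2 0))

-- B's loop state: arr/min_vio/best_edges, the found flag modeling 'best = arr' aliasing
-- (as in port A), and the prev-vertex cache (prev, rest, incident)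
structure PvStB where
  arr : List Int
  minv : Int
  be : List (Int × Int)
  found : Bool
  prev : Option Int
  rest : Int
  inc : List (Int × Int)
deriving Repr, DecidableEq

-- body of B's loop over the flat (v, j) candidate stream
def pvStepB (edges : List (Int × Int)) (st : PvStB) (c : Int × Int) : PvStB :=
  let v := c.1
  let j := c.2
  let cache :=
    if st.prev = some v then (st.prev, st.rest, st.inc)
    else (some v, pvRest st.arr v edges, pvIncident v edges)
  let arr := PySem.List.pySetD st.arr v j
  let cnt := cache.2.1 + ((cache.2.2.countP (pvPred arr v j)) : Int)
  if cnt < st.minv then ⟨arr, cnt, pvBestEdges arr edges, true, cache.1, cache.2.1, cache.2.2⟩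
  else ⟨arr, st.minv, st.be, st.found, cache.1, cache.2.1, cache.2.2⟩

def swap_color_alt (new_solution : List Int) (violations : Int) (vio_edge : List (Int × Int)) (tabu_list : List Int) (k : Int) (edges : List (Int × Int)) : List Int × Int × (List (Int × Int)) :=
  let cands := vio_edge.flatMap (fun i => (PySem.List.pyRange 0 k 1).map (fun j => (i.1, j)))
  let st := cands.foldl (pvStepB edges) ⟨new_solution, 999, [], false, none, 0, []⟩
  (if st.found then st.arr else [], st.minv, st.be)

-- ===== PRECONDITION & SPEC =====
-- Pre_ admits empty vio_edge and k ≤ 0 (neither program touches the edges) and otherwise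
-- restricts vertex indices to the canonical range 0..len-1: out-of-range indices make A
-- raise IndexError when k ≥ 1, and negative in-range indices reach a value in A only
-- through Python's accidental negative-index wraparound, an aliasing no colouring input
-- uses, while B compares vertex labels literally.
def Pre_swap_color (new_solution : List Int) (violations : Int) (vio_edge : List (Int × Int)) (tabu_list : List Int) (k : Int) (edges : List (Int × Int)) : Prop :=
  vio_edge = [] ∨ k ≤ 0 ∨
    ((∀ i ∈ vio_edge, 0 ≤ i.1 ∧ i.1 < (new_solution.length : Int)) ∧
     (∀ e ∈ edges, (0 ≤ e.1 ∧ e.1 < (new_solution.length : Int)) ∧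
                   (0 ≤ e.2 ∧ e.2 < (new_solution.length : Int))))
instance (new_solution : List Int) (violations : Int) (vio_edge : List (Int × Int)) (tabu_list : List Int) (k : Int) (edges : List (Int × Int)) : Decidable (Pre_swap_color new_solution violations vio_edge tabu_list k edges) := by unfold Pre_swap_color; infer_instance

def pvWitness_swap_color : List Int × Int × (List (Int × Int)) × List Int × Int × (List (Int × Int)) :=
  ([0, 0, 1], 0, [(0, 1)], [], 2, [(0, 1), (1, 2)])

def Spec_swap_color (new_solution : List Int) (violations : Int) (vio_edge : List (Int × Int)) (tabu_list : List Int) (k : Int) (edges : List (Int × Int)) (out : List Int × Int × (List (Int × Int))) : Prop := out = swap_color_alt new_solution violations vio_edge tabu_list k edges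
instance (new_solution : List Int) (violations : Int) (vio_edge : List (Int × Int)) (tabu_list : List Int) (k : Int) (edges : List (Int × Int)) (out : List Int × Int × (List (Int × Int))) : Decidable (Spec_swap_color new_solution violations vio_edge tabu_list k edges out) := by unfold Spec_swap_color; infer_instance

-- ===== CLAIM (what is proved, stated in full; the proofs are below) =====
def Claim_equal_swap_color : Prop := ∀ (new_solution : List Int) (violations : Int) (vio_edge : List (Int × Int)) (tabu_list : List Int) (k : Int) (edges : List (Int × Int)), Dom_swap_color new_solution violations vio_edge tabu_list k edges → Pre_swap_color new_solution violations vio_edge tabu_list k edges → Spec_swap_color new_solution violations vio_edge tabu_list k edges (swap_color new_solution violations vio_edge tabu_list k edges)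

-- ===== LEMMAS AND PROOFS =====

theorem pv_witness_ok : Dom_swap_color (pvWitness_swap_color.1) (pvWitness_swap_color.2.1) (pvWitness_swap_color.2.2.1) (pvWitness_swap_color.2.2.2.1) (pvWitness_swap_color.2.2.2.2.1) (pvWitness_swap_color.2.2.2.2.2) ∧ Pre_swap_color (pvWitness_swap_color.1) (pvWitness_swap_color.2.1) (pvWitness_swap_color.2.2.1) (pvWitness_swap_color.2.2.2.1) (pvWitness_swap_color.2.2.2.2.1) (pvWitness_swap_color.2.2.2.2.2) := by
  constructor <;> decide

-- the edge-violation predicate both sides compute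
def pvP (sol : List Int) (e : Int × Int) : Bool :=
  decide (PySem.List.pyGetD sol e.1 0 = PySem.List.pyGetD sol e.2 0)

-- A's view of B's state
def pvProj (st : PvStB) : List Int × Int × List (Int × Int) × Bool :=
  (st.arr, st.minv, st.be, st.found)

-- the cross-group cache invariant: whatever is cached is the split for that vertex
-- against the current array
def pvCacheOK (edges : List (Int × Int)) (st : PvStB) : Prop :=
  ∀ p, st.prev = some p → st.rest = pvRest st.arr p edges ∧ st.inc = pvIncident p edges

theorem pv_foldl_const {α β : Type} (l : List α) (s : β) :
    l.foldl (fun s _ => s) s = s := by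
  induction l generalizing s with
  | nil => rfl
  | cons x xs ih => simpa using ih s

theorem pv_foldl_flatMap {α β γ : Type} (g : α → List β) (f : γ → β → γ) :
    ∀ (l : List α) (s : γ),
      (l.flatMap g).foldl f s = l.foldl (fun s a => (g a).foldl f s) s := by
  intro l
  induction l with
  | nil => intro s; rfl
  | cons a l ih =>
    intro s
    simp only [List.flatMap_cons, List.foldl_append, List.foldl_cons, ih]

theorem pvEvaluate_fold (sol : List Int) (edges : List (Int × Int)) (c : Int)
    (acc : List (Int × Int)) :
    edges.foldl
      (fun st edge =>
        if PySem.List.pyGetD sol edge.1 0 = PySem.List.pyGetD sol edge.2 0 then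
          (st.1 + 1, st.2 ++ [edge])
        else st)
      (c, acc)
      = (c + (edges.countP (pvP sol) : Int), acc ++ edges.filter (pvP sol)) := by
  induction edges generalizing c acc with
  | nil => simp
  | cons e es ih =>
    by_cases h : PySem.List.pyGetD sol e.1 0 = PySem.List.pyGetD sol e.2 0
    · simp only [List.foldl_cons, if_pos h, ih, List.countP_cons, List.filter_cons, pvP,
        decide_eq_true_eq, if_pos h]
      refine Prod.ext ?_ ?_ <;> simp <;> omega
    · simp only [List.foldl_cons, if_neg h, ih, List.countP_cons, List.filter_cons, pvP,
        decide_eq_true_eq, if_neg h]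
      simp

theorem pvEvaluate_spec (sol : List Int) (edges : List (Int × Int)) :
    pvEvaluate sol edges = ((edges.countP (pvP sol) : Int), edges.filter (pvP sol)) := by
  simpa using pvEvaluate_fold sol edges 0 []

theorem pvGetD_set_self (sol : List Int) {v : Int} (j : Int)
    (h0 : 0 ≤ v) (h1 : v < (sol.length : Int)) :
    PySem.List.pyGetD (PySem.List.pySetD sol v j) v 0 = j := by
  rw [PySem.List.pySetD_of_nonneg _ _ h0,
    PySem.List.pyGetD_eq_getElem _ _ h0 (by simp; omega)]
  exact List.getElem_set_self _

theorem pvGetD_set_ne (sol : List Int) {v a : Int} (j : Int)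
    (hv : 0 ≤ v) (ha0 : 0 ≤ a) (ha1 : a < (sol.length : Int)) (hne : a ≠ v) :
    PySem.List.pyGetD (PySem.List.pySetD sol v j) a 0 = PySem.List.pyGetD sol a 0 := by
  rw [PySem.List.pySetD_of_nonneg _ _ hv,
    PySem.List.pyGetD_eq_getElem _ _ ha0 (by simp; omega),
    PySem.List.pyGetD_eq_getElem _ _ ha0 (by omega)]
  exact List.getElem_set_ne (by omega) _

theorem pvSetD_setD (sol : List Int) {v : Int} (j j' : Int) (hv : 0 ≤ v) :
    PySem.List.pySetD (PySem.List.pySetD sol v j') v j = PySem.List.pySetD sol v j := by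
  rw [PySem.List.pySetD_of_nonneg _ _ hv, PySem.List.pySetD_of_nonneg _ _ hv,
    PySem.List.pySetD_of_nonneg _ _ hv]
  exact List.set_set _

-- when arr[v] = j, B's comparison with the explicit j is just the violation predicate
theorem pvPred_eq_pvP (arr : List Int) (v j : Int)
    (h : PySem.List.pyGetD arr v 0 = j) (ab : Int × Int) :
    pvPred arr v j ab = pvP arr ab := by
  unfold pvPred pvP
  by_cases h1 : ab.1 = v <;> by_cases h2 : ab.2 = v <;> simp [h1, h2, h]

-- splitting a count by a second predicate
theorem pv_countP_split {α : Type} (l : List α) (p q : α → Bool) :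
    l.countP p
      = l.countP (fun a => p a && q a) + l.countP (fun a => p a && !q a) := by
  induction l with
  | nil => simp
  | cons x xs ih =>
    simp only [List.countP_cons, ih]
    by_cases hq : q x = true <;> by_cases hp : p x = true <;> simp [hp, hq] <;> omega

-- the rest-count only looks at cells other than v
theorem pvRest_set (sol : List Int) (v j : Int)
    (hv0 : 0 ≤ v) (hv1 : v < (sol.length : Int))
    (edges : List (Int × Int))
    (hes : ∀ e ∈ edges, (0 ≤ e.1 ∧ e.1 < (sol.length : Int)) ∧
                        (0 ≤ e.2 ∧ e.2 < (sol.length : Int))) :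
    pvRest (PySem.List.pySetD sol v j) v edges = pvRest sol v edges := by
  unfold pvRest
  congr 1
  refine List.countP_congr ?_
  intro ab hab
  obtain ⟨⟨ha0, ha1⟩, hb0, hb1⟩ := hes ab hab
  by_cases h1 : ab.1 = v
  · simp [h1]
  · by_cases h2 : ab.2 = v
    · simp [h2]
    · have e1 := pvGetD_set_ne sol j hv0 ha0 ha1 h1
      have e2 := pvGetD_set_ne sol j hv0 hb0 hb1 h2
      simp [h1, h2, e1, e2]

-- rest + (number of incident edges violated at colour j) = full violation count of the
-- recoloured solution
theorem pvSplit_count (sol : List Int) (v j : Int)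
    (hv0 : 0 ≤ v) (hv1 : v < (sol.length : Int))
    (edges : List (Int × Int))
    (hes : ∀ e ∈ edges, (0 ≤ e.1 ∧ e.1 < (sol.length : Int)) ∧
                        (0 ≤ e.2 ∧ e.2 < (sol.length : Int))) :
    pvRest sol v edges
      + (((pvIncident v edges).countP (pvP (PySem.List.pySetD sol v j))) : Int)
      = (edges.countP (pvP (PySem.List.pySetD sol v j)) : Int) := by
  set arr := PySem.List.pySetD sol v j with harr
  have hrest : pvRest sol v edges
      = (edges.countP (fun ab => pvP arr ab && !(decide (ab.1 = v ∨ ab.2 = v))) : Int) := by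
    unfold pvRest
    congr 1
    refine List.countP_congr ?_
    intro ab hab
    obtain ⟨⟨ha0, ha1⟩, hb0, hb1⟩ := hes ab hab
    by_cases h1 : ab.1 = v
    · simp [h1]
    · by_cases h2 : ab.2 = v
      · simp [h1, h2]
      · have e1 := pvGetD_set_ne sol j hv0 ha0 ha1 h1
        have e2 := pvGetD_set_ne sol j hv0 hb0 hb1 h2
        simp only [pvP, harr, e1, e2, h1, h2]
        simp [Bool.and_comm]
  have hincd : (pvIncident v edges).countP (pvP arr)
      = edges.countP (fun ab => pvP arr ab && decide (ab.1 = v ∨ ab.2 = v)) := by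
    unfold pvIncident
    rw [List.countP_filter]
  rw [hrest, hincd]
  have hsplit := pv_countP_split edges (pvP arr) (fun ab => decide (ab.1 = v ∨ ab.2 = v))
  beta_reduce at hsplit
  push_cast
  omega

-- within a run of candidates for one vertex v, B's step tracks A's step and keeps the
-- cache equal to the split of the run-entry array
theorem pvInner_eq (sol₀ : List Int) (i : Int × Int) (edges : List (Int × Int))
    (hi0 : 0 ≤ i.1) (hi1 : i.1 < (sol₀.length : Int))
    (hes : ∀ e ∈ edges, (0 ≤ e.1 ∧ e.1 < (sol₀.length : Int)) ∧
                        (0 ≤ e.2 ∧ e.2 < (sol₀.length : Int))) :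
    ∀ (js : List Int) (st : PvStB),
      st.arr.length = sol₀.length →
      (∀ j, PySem.List.pySetD st.arr i.1 j = PySem.List.pySetD sol₀ i.1 j) →
      pvRest st.arr i.1 edges = pvRest sol₀ i.1 edges →
      pvCacheOK edges st →
      pvProj ((js.map (fun j => (i.1, j))).foldl (pvStepB edges) st)
          = js.foldl (pvInnerA i edges) (pvProj st)
      ∧ ((js.map (fun j => (i.1, j))).foldl (pvStepB edges) st).arr.length = sol₀.length
      ∧ (∀ j, PySem.List.pySetD ((js.map (fun j => (i.1, j))).foldl (pvStepB edges) st).arr i.1 j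
          = PySem.List.pySetD sol₀ i.1 j)
      ∧ pvRest ((js.map (fun j => (i.1, j))).foldl (pvStepB edges) st).arr i.1 edges
          = pvRest sol₀ i.1 edges
      ∧ pvCacheOK edges ((js.map (fun j => (i.1, j))).foldl (pvStepB edges) st) := by
  set v := i.1 with hv
  intro js
  induction js with
  | nil => intro st hlen hset hrest hcache; exact ⟨rfl, hlen, hset, hrest, hcache⟩
  | cons j js ih =>
    intro st hlen hset hrest hcache
    set arr := PySem.List.pySetD sol₀ v j with harrdef
    have hset' : PySem.List.pySetD st.arr v j = arr := hset j
    have hlen' : arr.length = sol₀.length := PySem.List.length_pySetD _ _ _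
    -- the effective cache of this step is the split of the run-entry array
    have hcval : (if st.prev = some v then (st.prev, st.rest, st.inc)
        else (some v, pvRest st.arr v edges, pvIncident v edges))
        = (some v, pvRest sol₀ v edges, pvIncident v edges) := by
      by_cases hp : st.prev = some v
      · obtain ⟨h1, h2⟩ := hcache v hp
        rw [if_pos hp, hp, h1, h2, hrest]
      · rw [if_neg hp, hrest]
    -- the candidate count equals A's full evaluation count
    have hcnt : pvRest sol₀ v edges + (((pvIncident v edges).countP (pvPred arr v j)) : Int)
        = (edges.countP (pvP arr) : Int) := by
      have hpred : (pvIncident v edges).countP (pvPred arr v j)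
          = (pvIncident v edges).countP (pvP arr) :=
        List.countP_congr (fun ab _ => by
          rw [pvPred_eq_pvP arr v j (pvGetD_set_self sol₀ j hi0 hi1) ab])
      rw [hpred, harrdef]
      exact pvSplit_count sol₀ v j hi0 hi1 edges hes
    have hbest : pvBestEdges arr edges = edges.filter (pvP arr) := rfl
    set st' := pvStepB edges st (v, j) with hst'
    have hst'eq : st' = if (edges.countP (pvP arr) : Int) < st.minv then
          ⟨arr, (edges.countP (pvP arr) : Int), edges.filter (pvP arr), true,
            some v, pvRest sol₀ v edges, pvIncident v edges⟩
        else ⟨arr, st.minv, st.be, st.found,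
            some v, pvRest sol₀ v edges, pvIncident v edges⟩ := by
      rw [hst']
      simp only [pvStepB, hcval, hset', hcnt, hbest]
    have hprojstep : pvProj st' = pvInnerA i edges (pvProj st) j := by
      rw [hst'eq]
      simp only [pvInnerA, pvProj, pvEvaluate_spec, ← hv, hset]
      split <;> rfl
    have harr' : st'.arr = arr := by rw [hst'eq]; split <;> rfl
    have hrest' : pvRest st'.arr v edges = pvRest sol₀ v edges := by
      rw [harr', harrdef]
      exact pvRest_set sol₀ v j hi0 hi1 edges hes
    have hset'' : ∀ j', PySem.List.pySetD st'.arr v j' = PySem.List.pySetD sol₀ v j' := by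
      intro j'
      rw [harr', harrdef]
      exact pvSetD_setD sol₀ j' j hi0
    have hlen'' : st'.arr.length = sol₀.length := by rw [harr']; exact hlen'
    have hcache' : pvCacheOK edges st' := by
      intro p hp
      have hprev : st'.prev = some v := by rw [hst'eq]; split <;> rfl
      have hpv : p = v := by rw [hprev] at hp; exact (Option.some_inj.mp hp).symm
      subst hpv
      have h1 : st'.rest = pvRest sol₀ v edges := by rw [hst'eq]; split <;> rfl
      have h2 : st'.inc = pvIncident v edges := by rw [hst'eq]; split <;> rfl
      exact ⟨by rw [h1, hrest'], h2⟩
    have hrec := ih st' hlen'' hset'' hrest' hcache'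
    simp only [List.map_cons, List.foldl_cons, ← hst']
    rw [hrec.1, hprojstep]
    exact ⟨rfl, hrec.2.1, hrec.2.2.1, hrec.2.2.2.1, hrec.2.2.2.2⟩

-- the two outer loops agree
theorem pvOuter_eq (edges : List (Int × Int)) (k : Int) (L : Nat)
    (hes : ∀ e ∈ edges, (0 ≤ e.1 ∧ e.1 < (L : Int)) ∧ (0 ≤ e.2 ∧ e.2 < (L : Int))) :
    ∀ (vio : List (Int × Int)) (st : PvStB),
      st.arr.length = L →
      pvCacheOK edges st →
      (∀ i ∈ vio, 0 ≤ i.1 ∧ i.1 < (L : Int)) →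
      pvProj (vio.foldl
          (fun st i => ((PySem.List.pyRange 0 k 1).map (fun j => (i.1, j))).foldl
            (pvStepB edges) st) st)
        = vio.foldl (fun st i => (PySem.List.pyRange 0 k 1).foldl (pvInnerA i edges) st)
            (pvProj st) := by
  intro vio
  induction vio with
  | nil => intro st _ _ _; rfl
  | cons i vio ih =>
    intro st hlen hcache hvio
    obtain ⟨hi0, hi1⟩ := hvio i (by simp)
    obtain ⟨hproj, hlen1, -, -, hcache1⟩ :=
      pvInner_eq st.arr i edges hi0 (by rw [hlen]; exact hi1) (by rw [hlen]; exact hes)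
        (PySem.List.pyRange 0 k 1) st rfl (fun _ => rfl) rfl hcache
    rw [hlen] at hlen1
    simp only [List.foldl_cons]
    rw [← hproj]
    exact ih _ hlen1 hcache1 (fun x hx => hvio x (by simp [hx]))

-- ===== VERDICT (by name: the statement is the Claim_ definition above) =====
theorem swap_color_spec : Claim_equal_swap_color := by
  intro new_solution violations vio_edge tabu_list k edges _ hpre
  unfold Spec_swap_color
  rcases hpre with hv | hk | ⟨hvio, hes⟩
  · subst hv
    rfl
  · have hr : PySem.List.pyRange 0 k 1 = [] := PySem.List.pyRange_one_eq_nil (by omega)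
    simp only [swap_color, swap_color_alt, hr, List.map_nil, List.foldl_nil,
      pv_foldl_const]
    have : vio_edge.flatMap (fun _ : Int × Int => ([] : List (Int × Int))) = [] := by
      simp
    rw [this]
    rfl
  · simp only [swap_color, swap_color_alt]
    rw [pv_foldl_flatMap]
    have h := pvOuter_eq edges k new_solution.length hes vio_edge
      ⟨new_solution, 999, [], false, none, 0, []⟩ rfl (fun p hp => by simp at hp) hvio
    have hproj0 : pvProj ⟨new_solution, 999, [], false, none, 0, []⟩
        = (new_solution, 999, ([] : List (Int × Int)), false) := rfl
    rw [hproj0] at h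
    unfold pvProj at h
    rw [show (vio_edge.foldl
        (fun st i => (PySem.List.pyRange 0 k 1).foldl (pvInnerA i edges) st)
        (new_solution, 999, ([] : List (Int × Int)), false))
        = ((vio_edge.foldl
          (fun st i => ((PySem.List.pyRange 0 k 1).map (fun j => (i.1, j))).foldl
            (pvStepB edges) st) ⟨new_solution, 999, [], false, none, 0, []⟩).arr,
          (vio_edge.foldl
          (fun st i => ((PySem.List.pyRange 0 k 1).map (fun j => (i.1, j))).foldl
            (pvStepB edges) st) ⟨new_solution, 999, [], false, none, 0, []⟩).minv,
          (vio_edge.foldl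
          (fun st i => ((PySem.List.pyRange 0 k 1).map (fun j => (i.1, j))).foldl
            (pvStepB edges) st) ⟨new_solution, 999, [], false, none, 0, []⟩).be,
          (vio_edge.foldl
          (fun st i => ((PySem.List.pyRange 0 k 1).map (fun j => (i.1, j))).foldl
            (pvStepB edges) st) ⟨new_solution, 999, [], false, none, 0, []⟩).found) from h.symm]
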